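-- pv_equiv track=rewrite | github.com/lin432/University-Work | CSCA48/ex7.py | _subsequence2
-- ===== SOURCE A (Python) =====
-- def _subsequence2(want, s, index, end):
--     '''(string, string, int, int, int, int) -> boolean
--     helper method for subsequence that goes through s2'''
--     ret = (False, end)
--     if(index < end):
--         if(want == s[index]):
--             ret = (True, index)
--         else:
--             ret = _subsequence2(want, s, index+1, end)
--     return ret
-- ===== SOURCE B (Python) =====
-- def _subsequence2(want, s, index, end):
--     for i in range(index, end):
--         if want == s[i]:
--             return (True, i)
--     return (False, end)
-- ===== Notes on version B (the rewrite author's own statement) =====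
-- stated objective: simpler
-- what changed: Replaces A's recursive descent (one call frame per position, result threaded back through 'ret') with a flat iterative scan over range(index, end) that returns the first match directly; same positions probed, same (False, end) fall-through.
import Mathlib
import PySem

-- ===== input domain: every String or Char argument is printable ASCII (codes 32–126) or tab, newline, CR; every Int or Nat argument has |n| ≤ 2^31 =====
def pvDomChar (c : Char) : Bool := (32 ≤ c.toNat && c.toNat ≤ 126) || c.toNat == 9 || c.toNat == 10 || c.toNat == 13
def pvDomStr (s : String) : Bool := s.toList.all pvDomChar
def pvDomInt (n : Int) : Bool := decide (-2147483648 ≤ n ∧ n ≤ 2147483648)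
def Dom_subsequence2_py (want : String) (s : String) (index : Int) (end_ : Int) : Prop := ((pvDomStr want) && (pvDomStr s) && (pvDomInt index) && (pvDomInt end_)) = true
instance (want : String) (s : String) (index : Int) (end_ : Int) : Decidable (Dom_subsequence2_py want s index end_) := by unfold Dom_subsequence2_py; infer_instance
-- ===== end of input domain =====

-- B replaces A's recursion with a flat iterative scan over the index range; objective: simpler.


-- ===== PORT A =====
-- Python's `want == s[index]` compares the string `want` with the 1-char string s[index];
-- exact as `want.toList = [c]` with c the char PySem.Str.pyGet? returns (none = IndexError, excluded by Pre_).
def subsequence2_py (want : String) (s : String) (index : Int) (end_ : Int) : Bool × Int :=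
  if _h : index < end_ then
    match PySem.Str.pyGet? s index with
    | none => (false, end_)            -- IndexError in Python; outside Pre_
    | some c =>
      if want.toList = [c] then (true, index)
      else subsequence2_py want s (index + 1) end_
  else (false, end_)
termination_by (end_ - index).toNat
decreasing_by omega

-- ===== PORT B =====
-- the `for i in range(index, end)` loop of Source B: structural recursion over the range list
def pvScanB (want : String) (s : String) (idxs : List Int) (end_ : Int) : Bool × Int :=
  match idxs with
  | [] => (false, end_)
  | i :: rest =>
    match PySem.Str.pyGet? s i with
    | none => (false, end_)            -- IndexError in Python; outside Pre_
    | some c => if want.toList = [c] then (true, i) else pvScanB want s rest end_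

def subsequence2_py_alt (want : String) (s : String) (index : Int) (end_ : Int) : Bool × Int :=
  pvScanB want s (PySem.List.pyRange index end_ 1) end_

-- ===== PRECONDITION & SPEC =====
-- Pre_ excludes exactly the inputs where the Python A raises IndexError: a nonempty range that
-- starts below -len(s), or runs past len(s) with no match before the run-off (both ports agree
-- everywhere; this only mirrors where Python returns at all).
def Pre_subsequence2_py (want : String) (s : String) (index : Int) (end_ : Int) : Prop :=
  index < end_ →
    (-(PySem.Str.len s) ≤ index ∧
      (end_ ≤ PySem.Str.len s ∨
        ((PySem.List.pyRange index (PySem.Str.len s) 1).any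
          (fun i => ((PySem.Str.pyGet? s i).map (fun c => want.toList == [c])).getD false)) = true))
instance (want : String) (s : String) (index : Int) (end_ : Int) : Decidable (Pre_subsequence2_py want s index end_) := by unfold Pre_subsequence2_py; infer_instance

def pvWitness_subsequence2_py : String × String × Int × Int := ("a", "xay", 0, 3)

def Spec_subsequence2_py (want : String) (s : String) (index : Int) (end_ : Int) (out : Bool × Int) : Prop := out = subsequence2_py_alt want s index end_
instance (want : String) (s : String) (index : Int) (end_ : Int) (out : Bool × Int) : Decidable (Spec_subsequence2_py want s index end_ out) := by unfold Spec_subsequence2_py; infer_instance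

-- ===== CLAIM (what is proved, stated in full; the proofs are below) =====
def Claim_equal_subsequence2_py : Prop := ∀ (want : String) (s : String) (index : Int) (end_ : Int), Dom_subsequence2_py want s index end_ → Pre_subsequence2_py want s index end_ → Spec_subsequence2_py want s index end_ (subsequence2_py want s index end_)

-- ===== LEMMAS AND PROOFS =====
lemma subsequence2_eq_scan (want : String) (s : String) :
    ∀ (n : Nat) (index end_ : Int), (end_ - index).toNat = n →
      subsequence2_py want s index end_ = pvScanB want s (PySem.List.pyRange index end_ 1) end_ := by
  intro n
  induction n with
  | zero =>
    intro index end_ h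
    have hle : end_ ≤ index := by omega
    rw [subsequence2_py, PySem.List.pyRange_one_eq_nil hle]
    simp [pvScanB, show ¬ index < end_ by omega]
  | succ m ih =>
    intro index end_ h
    have hlt : index < end_ := by omega
    rw [subsequence2_py, PySem.List.pyRange_one_cons hlt]
    simp only [hlt, dif_pos, pvScanB]
    cases PySem.Str.pyGet? s index with
    | none => rfl
    | some c =>
      by_cases hc : want.toList = [c]
      · simp [hc]
      · simp only [hc, if_false]
        exact ih (index + 1) end_ (by omega)

-- ===== VERDICT (by name: the statement is the Claim_ definition above) =====
theorem subsequence2_py_spec : Claim_equal_subsequence2_py := by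
  intro want s index end_ _ _
  unfold Spec_subsequence2_py subsequence2_py_alt
  exact subsequence2_eq_scan want s (end_ - index).toNat index end_ rfl
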